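-- pv_equiv track=rewrite | github.com/robbel/libcrlext | experimentor/lib/csv_util.py | augmentCSVs
-- ===== SOURCE A (Python) =====
-- def augmentCSVs(in_csvs):
--     out_csv = []
--     widths = [max(line_width) for line_width in [[len(line) for line in csv] for csv in in_csvs]]
--     lengths = [len(csv) for csv in in_csvs]
--     length = max(lengths)
--     for row in range(length):
--         line = []
--         for i in range(len(in_csvs)):
--             line_width = 0
--             if row < len(in_csvs[i]):
--                 line_width = len(in_csvs[i][row])
--             for col in range(line_width):
--                 line.append(in_csvs[i][row][col])
--             line += [None]*(widths[i]-line_width)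
--         out_csv.append(line)
--
--     return out_csv
-- ===== SOURCE B (Python) =====
-- def augmentCSVs(in_csvs):
--     widths = [max(len(line) for line in csv) for csv in in_csvs]
--     length = max(len(csv) for csv in in_csvs)
--     # column-major: extract every output COLUMN (length entries, None where absent)...
--     columns = []
--     for csv, w in zip(in_csvs, widths):
--         for c in range(w):
--             columns.append([csv[r][c] if r < len(csv) and c < len(csv[r]) else None
--                             for r in range(length)])
--     # ...then transpose the columns back into rows
--     return [[col[r] for col in columns] for r in range(length)]
-- ===== Notes on version B (the rewrite author's own statement) =====
-- stated objective: alternative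
-- what changed: B builds the result column-major: it extracts every output column (one list of `length` entries per column of each CSV, None where a cell is absent) and then transposes the column list back into rows, instead of A's row-major double loop that appends cell by cell with on-the-fly padding.
import Mathlib
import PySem

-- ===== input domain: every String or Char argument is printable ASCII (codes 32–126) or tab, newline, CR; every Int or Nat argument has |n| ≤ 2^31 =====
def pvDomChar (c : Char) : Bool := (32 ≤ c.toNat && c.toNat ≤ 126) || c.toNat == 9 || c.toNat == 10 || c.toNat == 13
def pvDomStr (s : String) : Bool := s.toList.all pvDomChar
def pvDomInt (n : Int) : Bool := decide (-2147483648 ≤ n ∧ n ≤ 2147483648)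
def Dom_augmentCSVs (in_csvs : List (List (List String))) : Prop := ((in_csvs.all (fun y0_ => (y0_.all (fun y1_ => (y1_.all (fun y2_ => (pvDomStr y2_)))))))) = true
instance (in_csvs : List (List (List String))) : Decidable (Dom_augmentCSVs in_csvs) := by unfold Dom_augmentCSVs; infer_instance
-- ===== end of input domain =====

-- B builds the output column-major (extract every output column, then transpose back to
-- rows) instead of A's row-major cell-by-cell loop; alternative decomposition, same cost.

-- ===== PORT A =====
-- max(...) raises on an empty list; Pre_ excludes those inputs, so the .getD 0 default is never reached.
def augmentCSVs (in_csvs : List (List (List String))) : List (List (Option String)) :=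
  let widths : List Int :=
    in_csvs.map (fun csv => (PySem.List.max? (csv.map (fun line => (line.length : Int))) (fun x => x)).getD 0)
  let lengths : List Int := in_csvs.map (fun csv => (csv.length : Int))
  let length : Int := (PySem.List.max? lengths (fun x => x)).getD 0
  (PySem.List.pyRange 0 length 1).foldl (fun out_csv row =>
    let line : List (Option String) :=
      (PySem.List.pyRange 0 (in_csvs.length : Int) 1).foldl (fun line i =>
        let csvi := PySem.List.pyGetD in_csvs i []
        let line_width : Int :=
          if row < (csvi.length : Int) then ((PySem.List.pyGetD csvi row []).length : Int) else 0
        let line := (PySem.List.pyRange 0 line_width 1).foldl (fun line col =>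
          line ++ [some (PySem.List.pyGetD (PySem.List.pyGetD csvi row []) col "")]) line
        line ++ List.replicate ((PySem.List.pyGetD widths i 0) - line_width).toNat none) []
    out_csv ++ [line]) []

-- ===== PORT B =====
-- same max(...) convention as above: Pre_ keeps the .getD 0 defaults unreachable
def augmentCSVs_alt (in_csvs : List (List (List String))) : List (List (Option String)) :=
  let widths : List Int :=
    in_csvs.map (fun csv => (PySem.List.max? (csv.map (fun line => (line.length : Int))) (fun x => x)).getD 0)
  let length : Int := (PySem.List.max? (in_csvs.map (fun csv => (csv.length : Int))) (fun x => x)).getD 0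
  -- column-major: one entry of `columns` per output column
  let columns : List (List (Option String)) :=
    (in_csvs.zip widths).foldl (fun cols cw =>
      (PySem.List.pyRange 0 cw.2 1).foldl (fun cols c =>
        cols ++ [(PySem.List.pyRange 0 length 1).map (fun r =>
          if r < (cw.1.length : Int) ∧ c < ((PySem.List.pyGetD cw.1 r []).length : Int)
          then some (PySem.List.pyGetD (PySem.List.pyGetD cw.1 r []) c "") else none)]) cols) []
  -- transpose the columns back into rows
  (PySem.List.pyRange 0 length 1).map (fun r =>
    columns.map (fun col => PySem.List.pyGetD col r none))

-- ===== PRECONDITION & SPEC =====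
-- Pre_ excludes exactly the inputs on which Python A raises ValueError (max of an empty
-- sequence): the empty list of CSVs, or any CSV with no rows.
def Pre_augmentCSVs (in_csvs : List (List (List String))) : Prop :=
  in_csvs ≠ [] ∧ ∀ csv ∈ in_csvs, csv ≠ []
instance (in_csvs : List (List (List String))) : Decidable (Pre_augmentCSVs in_csvs) := by
  unfold Pre_augmentCSVs; infer_instance
def pvWitness_augmentCSVs : List (List (List String)) := [[["a", "b"], ["c"]], [["x"]]]

def Spec_augmentCSVs (in_csvs : List (List (List String))) (out : List (List (Option String))) : Prop := out = augmentCSVs_alt in_csvs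
instance (in_csvs : List (List (List String))) (out : List (List (Option String))) : Decidable (Spec_augmentCSVs in_csvs out) := by unfold Spec_augmentCSVs; infer_instance

-- ===== CLAIM (what is proved, stated in full; the proofs are below) =====
def Claim_equal_augmentCSVs : Prop := ∀ (in_csvs : List (List (List String))), Dom_augmentCSVs in_csvs → Pre_augmentCSVs in_csvs → Spec_augmentCSVs in_csvs (augmentCSVs in_csvs)

-- ===== LEMMAS AND PROOFS =====

-- width of one CSV (max row length) and the overall length, as both ports compute them
def pvW (csv : List (List String)) : Int :=
  (PySem.List.max? (csv.map (fun line => (line.length : Int))) (fun x => x)).getD 0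

def pvL (in_csvs : List (List (List String))) : Int :=
  (PySem.List.max? (in_csvs.map (fun csv => (csv.length : Int))) (fun x => x)).getD 0

-- one cell of the padded output, as B's column comprehension computes it
def pvCell (csv : List (List String)) (r c : Int) : Option String :=
  if r < (csv.length : Int) ∧ c < ((PySem.List.pyGetD csv r []).length : Int)
  then some (PySem.List.pyGetD (PySem.List.pyGetD csv r []) c "") else none

-- A's inner loop for one output row
def pvRowA (in_csvs : List (List (List String))) (row : Int) : List (Option String) :=
  (PySem.List.pyRange 0 (in_csvs.length : Int) 1).foldl (fun line i =>
    let csvi := PySem.List.pyGetD in_csvs i []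
    let line_width : Int :=
      if row < (csvi.length : Int) then ((PySem.List.pyGetD csvi row []).length : Int) else 0
    let line := (PySem.List.pyRange 0 line_width 1).foldl (fun line col =>
      line ++ [some (PySem.List.pyGetD (PySem.List.pyGetD csvi row []) col "")]) line
    line ++ List.replicate ((PySem.List.pyGetD (in_csvs.map pvW) i 0) - line_width).toNat none) []

-- A's per-CSV segment of one output row
def pvSegA (csv : List (List String)) (row : Int) : List (Option String) :=
  let line_width : Int :=
    if row < (csv.length : Int) then ((PySem.List.pyGetD csv row []).length : Int) else 0
  (PySem.List.pyRange 0 line_width 1).map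
    (fun col => some (PySem.List.pyGetD (PySem.List.pyGetD csv row []) col "")) ++
  List.replicate (pvW csv - line_width).toNat none

theorem pv_zip_self_map {a b : Type} (f : a -> b) (l : List a) :
    l.zip (l.map f) = l.map (fun x => (x, f x)) := by
  induction l with
  | nil => rfl
  | cons x t ih => simp [ih]

theorem pvA_eq_map (in_csvs : List (List (List String))) :
    augmentCSVs in_csvs = (PySem.List.pyRange 0 (pvL in_csvs) 1).map (pvRowA in_csvs) := by
  unfold augmentCSVs
  rw [PySem.List.foldl_append_singleton_eq_map]
  rfl

theorem pvRowA_eq_flatMap (in_csvs : List (List (List String))) (row : Int) :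
    pvRowA in_csvs row = in_csvs.flatMap (fun csv => pvSegA csv row) := by
  unfold pvRowA
  have hW : ∀ i : Int, PySem.List.pyGetD (in_csvs.map pvW) i 0 = pvW (PySem.List.pyGetD in_csvs i []) := by
    intro i
    have h0' : (0 : Int) = pvW [] := rfl
    rw [h0', PySem.List.pyGetD_map]
  simp only [hW]
  have hstep : ∀ line csv, (let line_width : Int :=
        if row < ((csv : List (List String)).length : Int) then ((PySem.List.pyGetD csv row []).length : Int) else 0
      let line := (PySem.List.pyRange 0 line_width 1).foldl (fun line col =>
        line ++ [some (PySem.List.pyGetD (PySem.List.pyGetD csv row []) col "")]) (line : List (Option String))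
      line ++ List.replicate (pvW csv - line_width).toNat none) = line ++ pvSegA csv row := by
    intro line csv
    simp only [pvSegA, PySem.List.foldl_append_singleton_eq_map, List.append_assoc]
  calc (PySem.List.pyRange 0 (in_csvs.length : Int) 1).foldl
        (fun line i =>
          let csvi := PySem.List.pyGetD in_csvs i []
          let line_width : Int :=
            if row < (csvi.length : Int) then ((PySem.List.pyGetD csvi row []).length : Int) else 0
          let line := (PySem.List.pyRange 0 line_width 1).foldl (fun line col =>
            line ++ [some (PySem.List.pyGetD (PySem.List.pyGetD csvi row []) col "")]) line
          line ++ List.replicate (pvW csvi - line_width).toNat none) []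
      = (PySem.List.pyRange 0 (in_csvs.length : Int) 1).foldl
          (fun line i => line ++ pvSegA (PySem.List.pyGetD in_csvs i []) row) [] := by
        apply PySem.List.foldl_congr_mem
        intro line i _
        exact hstep line (PySem.List.pyGetD in_csvs i [])
    _ = in_csvs.foldl (fun line csv => line ++ pvSegA csv row) [] := by
        exact PySem.List.foldl_pyRange_zero_pyGetD' in_csvs []
          (fun line csv => line ++ pvSegA csv row) []
    _ = in_csvs.flatMap (fun csv => pvSegA csv row) := by
        rw [PySem.List.foldl_append_eq_flatMap]; rfl

-- B's columns list, and B as a row map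
theorem pvB_eq_map (in_csvs : List (List (List String))) :
    augmentCSVs_alt in_csvs =
      (PySem.List.pyRange 0 (pvL in_csvs) 1).map (fun r =>
        (in_csvs.flatMap (fun csv =>
          (PySem.List.pyRange 0 (pvW csv) 1).map (fun c =>
            (PySem.List.pyRange 0 (pvL in_csvs) 1).map (fun r' => pvCell csv r' c)))).map
          (fun col => PySem.List.pyGetD col r none)) := by
  unfold augmentCSVs_alt
  simp only [pv_zip_self_map]
  rw [show ((PySem.List.max? (in_csvs.map (fun csv => ((csv : List (List String)).length : Int))) (fun x => x)).getD 0) = pvL in_csvs from rfl]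
  rw [show (fun x => ((x : List (List String)), (PySem.List.max? (x.map (fun line => ((line : List String).length : Int))) (fun x => x)).getD 0)) = (fun csv => (csv, pvW csv)) from rfl]
  have hcols : ∀ (l : List (List (List String))) (acc : List (List (Option String))),
      (l.map (fun csv => (csv, pvW csv))).foldl (fun cols cw =>
        (PySem.List.pyRange 0 cw.2 1).foldl (fun cols c =>
          cols ++ [(PySem.List.pyRange 0 (pvL in_csvs) 1).map (fun r =>
            if r < (cw.1.length : Int) ∧ c < ((PySem.List.pyGetD cw.1 r []).length : Int)
            then some (PySem.List.pyGetD (PySem.List.pyGetD cw.1 r []) c "") else none)]) cols) acc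
      = acc ++ l.flatMap (fun csv =>
          (PySem.List.pyRange 0 (pvW csv) 1).map (fun c =>
            (PySem.List.pyRange 0 (pvL in_csvs) 1).map (fun r' => pvCell csv r' c))) := by
    intro l
    induction l with
    | nil => intro acc; simp
    | cons csv t ih =>
        intro acc
        simp only [List.map_cons, List.foldl_cons, List.flatMap_cons, ih]
        rw [PySem.List.foldl_append_singleton_eq_map]
        simp [pvCell, List.append_assoc]
  rw [hcols in_csvs []]
  rfl

-- per-CSV: A's padded segment is B's column slice, at every admitted row
theorem pvSeg_eq (csv : List (List String)) (row : Int) (hcsv : csv ≠ [])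
    (h0 : 0 ≤ row) :
    pvSegA csv row = (PySem.List.pyRange 0 (pvW csv) 1).map (fun c => pvCell csv row c) := by
  have hwnn : ∀ y ∈ csv.map (fun line => ((line : List String).length : Int)), y ≤ pvW csv := by
    intro y hy
    obtain ⟨m, hm⟩ : ∃ m, PySem.List.max? (csv.map (fun line => ((line : List String).length : Int))) (fun x => x) = some m := by
      cases hmax : PySem.List.max? (csv.map (fun line => ((line : List String).length : Int))) (fun x => x) with
      | none => exact absurd (List.map_eq_nil_iff.mp ((PySem.List.max?_eq_none_iff _ _).mp hmax)) hcsv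
      | some m => exact ⟨m, rfl⟩
    have := PySem.List.max?_isMax hm y hy
    simpa [pvW, hm] using this
  by_cases hr : row < (csv.length : Int)
  · -- present row: cells then padding = one map over the full width
    have hmem : PySem.List.pyGetD csv row [] ∈ csv :=
      PySem.List.pyGetD_mem csv [] ⟨by omega, by omega⟩
    have hlw : ((PySem.List.pyGetD csv row []).length : Int) ≤ pvW csv :=
      hwnn _ (List.mem_map_of_mem hmem)
    have h0lw : (0:Int) ≤ ((PySem.List.pyGetD csv row []).length : Int) := by positivity
    rw [PySem.List.pyRange_one_append 0 ((PySem.List.pyGetD csv row []).length : Int) (pvW csv) h0lw hlw, List.map_append]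
    unfold pvSegA
    simp only [hr, if_true]
    congr 1
    · apply List.map_congr_left
      intro c hc
      have hcb := PySem.List.mem_pyRange_one.mp hc
      simp [pvCell, hr, hcb.2]
    · have hnone : ∀ c ∈ PySem.List.pyRange ((PySem.List.pyGetD csv row []).length : Int) (pvW csv) 1, pvCell csv row c = none := by
        intro c hc
        have hcb := PySem.List.mem_pyRange_one.mp hc
        have hnc : ¬ c < ((PySem.List.pyGetD csv row []).length : Int) := by omega
        simp [pvCell, hr, hnc]
      rw [List.map_congr_left hnone]
      rw [List.map_const']
      rw [PySem.List.length_pyRange_one]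
  · -- absent row: all-None padding = one all-None map
    unfold pvSegA
    simp only [hr, if_false]
    have : ∀ c ∈ PySem.List.pyRange 0 (pvW csv) 1, pvCell csv row c = none := by
      intro c hc
      simp [pvCell, hr]
    rw [List.map_congr_left this, List.map_const', PySem.List.length_pyRange_one]
    simp

theorem pvRow_eq (in_csvs : List (List (List String))) (row : Int)
    (hpre : ∀ csv ∈ in_csvs, csv ≠ [])
    (h0 : 0 ≤ row) (hL : row < pvL in_csvs) :
    pvRowA in_csvs row =
      (in_csvs.flatMap (fun csv =>
        (PySem.List.pyRange 0 (pvW csv) 1).map (fun c =>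
          (PySem.List.pyRange 0 (pvL in_csvs) 1).map (fun r' => pvCell csv r' c)))).map
        (fun col => PySem.List.pyGetD col row none) := by
  rw [pvRowA_eq_flatMap, List.map_flatMap]
  apply List.flatMap_congr
  intro csv hcsv
  rw [List.map_map]
  have : ((fun col => PySem.List.pyGetD col row none) ∘ fun c =>
      (PySem.List.pyRange 0 (pvL in_csvs) 1).map (fun r' => pvCell csv r' c))
      = fun c => pvCell csv row c := by
    funext c
    simp only [Function.comp]
    exact PySem.List.pyGetD_map_pyRange_of_nonneg _ _ _ _ h0 hL
  rw [this]
  exact pvSeg_eq csv row (hpre csv hcsv) h0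

theorem pv_eq (in_csvs : List (List (List String)))
    (hpre : ∀ csv ∈ in_csvs, csv ≠ []) :
    augmentCSVs in_csvs = augmentCSVs_alt in_csvs := by
  rw [pvA_eq_map, pvB_eq_map]
  apply List.map_congr_left
  intro row hrow
  have h := PySem.List.mem_pyRange_one.mp hrow
  exact pvRow_eq in_csvs row hpre h.1 h.2

-- ===== VERDICT (by name: the statement is the Claim_ definition above) =====
theorem augmentCSVs_spec : Claim_equal_augmentCSVs := by
  intro in_csvs _ hpre
  exact pv_eq in_csvs hpre.2
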